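-- pv_equiv track=rewrite | github.com/io-sea/recommendation-system | cluster_simulator/cluster_simulator/analytics.py | accumulate_intervals
-- ===== SOURCE A (Python) =====
-- import itertools
--
-- def accumulate_intervals(x_phase, y_phase):
--     """Superimpose all points intervall within the boundary"""
--     points = sorted(list(set(sorted(list(itertools.chain.from_iterable(x_phase))))))
--
--     y = []
--     for point in points:
--         # init value for point
--         v = 0
--         for index, interval in enumerate(x_phase):
--             if point >= interval[0] and point < interval[1]:
--                 v += y_phase[index]
--         y.append(v)
--     return points, y
-- ===== SOURCE B (Python) =====
-- def accumulate_intervals(x_phase, y_phase):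
--     """Superimpose all points intervall within the boundary"""
--     points = sorted(set(v for iv in x_phase for v in iv))
--     # sweep line: difference map at interval endpoints, then one running-sum pass
--     diff = {}
--     for interval, w in zip(x_phase, y_phase):
--         if interval[0] < interval[1]:
--             diff[interval[0]] = diff.get(interval[0], 0) + w
--             diff[interval[1]] = diff.get(interval[1], 0) - w
--     y = []
--     running = 0
--     for p in points:
--         running += diff.get(p, 0)
--         y.append(running)
--     return points, y
-- ===== Notes on version B (the rewrite author's own statement) =====
-- stated objective: alternative
-- what changed: Replaced A's nested scan (for every point, re-scan all intervals and sum hit weights) by a sweep line: a difference dictionary (+w at interval start, -w at interval end, built once over zip(x_phase, y_phase)) followed by a single running-sum pass over the sorted points.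
-- outside the precondition, e.g. on accumulate_intervals([[], []], [1, 2]): A returns ([], []), B raises IndexError
import Mathlib
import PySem

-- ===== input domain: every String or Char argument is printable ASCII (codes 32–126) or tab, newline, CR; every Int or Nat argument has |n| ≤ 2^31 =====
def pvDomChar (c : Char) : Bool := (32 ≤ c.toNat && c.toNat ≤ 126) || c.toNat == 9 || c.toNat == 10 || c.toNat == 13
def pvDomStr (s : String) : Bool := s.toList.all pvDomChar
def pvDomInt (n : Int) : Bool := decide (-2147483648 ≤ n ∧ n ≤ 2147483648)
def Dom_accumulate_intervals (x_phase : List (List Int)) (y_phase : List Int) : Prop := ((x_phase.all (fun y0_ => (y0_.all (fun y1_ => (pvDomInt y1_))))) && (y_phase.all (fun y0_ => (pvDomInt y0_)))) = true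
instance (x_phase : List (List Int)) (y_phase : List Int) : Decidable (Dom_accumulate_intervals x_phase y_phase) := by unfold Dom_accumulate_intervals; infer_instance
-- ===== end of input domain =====

-- B replaces A's per-point re-scan of all intervals by a sweep line (a difference
-- dictionary at interval endpoints, then one running-sum pass over the sorted points).

-- ===== PORT A =====
def accumulate_intervals (x_phase : List (List Int)) (y_phase : List Int) : List Int × List Int :=
  let points := PySem.List.sorted
    (PySem.Set.ofList (PySem.List.sorted x_phase.flatten (fun v => v) false)) (fun v => v) false
  let y := points.foldl (fun acc point =>
      acc ++ [(PySem.List.enumerate x_phase 0).foldl (fun v q =>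
        if PySem.List.pyGetD q.2 0 0 ≤ point ∧ point < PySem.List.pyGetD q.2 1 0 then
          v + PySem.List.pyGetD y_phase q.1 0
        else v) 0]) []
  (points, y)

-- ===== PORT B =====
-- B-side helper: the difference dictionary built by B's first loop
-- (diff[interval[0]] += w; diff[interval[1]] -= w for nonempty intervals)
def diffD (x_phase : List (List Int)) (y_phase : List Int) : PySem.Dict Int Int :=
  (x_phase.zip y_phase).foldl (fun (d : PySem.Dict Int Int) q =>
      if PySem.List.pyGetD q.1 0 0 < PySem.List.pyGetD q.1 1 0 then
        (d.modify (PySem.List.pyGetD q.1 0 0) 0 (fun v => v + q.2)).modify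
          (PySem.List.pyGetD q.1 1 0) 0 (fun v => v - q.2)
      else d) PySem.Dict.empty

def accumulate_intervals_alt (x_phase : List (List Int)) (y_phase : List Int) : List Int × List Int :=
  let points := PySem.List.sorted (PySem.Set.ofList x_phase.flatten) (fun v => v) false
  let res := points.foldl (fun (ac : List Int × Int) p =>
      (ac.1 ++ [ac.2 + (diffD x_phase y_phase).getD p 0], ac.2 + (diffD x_phase y_phase).getD p 0))
    (([] : List Int), (0 : Int))
  (points, res.1)

-- ===== PRECONDITION & SPEC =====
-- Pre_ excludes exactly the inputs where the Python A raises IndexError: an interval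
-- with fewer than two elements while any interval value exists (interval[0]/interval[1]
-- out of range — on the corner where every interval is an empty list A returns a pair
-- of empty lists but B's own zip loop raises IndexError on interval[0], so that corner
-- stays excluded too), and a
-- nonempty interval at an index beyond y_phase (y_phase[index] out of range).
def Pre_accumulate_intervals (x_phase : List (List Int)) (y_phase : List Int) : Prop :=
  (∀ iv ∈ x_phase, 2 ≤ iv.length) ∧
  (∀ iv ∈ x_phase.drop y_phase.length, PySem.List.pyGetD iv 1 0 ≤ PySem.List.pyGetD iv 0 0)
instance (x_phase : List (List Int)) (y_phase : List Int) : Decidable (Pre_accumulate_intervals x_phase y_phase) := by unfold Pre_accumulate_intervals; infer_instance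

def pvWitness_accumulate_intervals : List (List Int) × List Int := ([[0, 2], [1, 3]], [1, 2])

def Spec_accumulate_intervals (x_phase : List (List Int)) (y_phase : List Int) (out : List Int × List Int) : Prop := out = accumulate_intervals_alt x_phase y_phase
instance (x_phase : List (List Int)) (y_phase : List Int) (out : List Int × List Int) : Decidable (Spec_accumulate_intervals x_phase y_phase out) := by unfold Spec_accumulate_intervals; infer_instance

-- ===== CLAIM (what is proved, stated in full; the proofs are below) =====
def Claim_equal_accumulate_intervals : Prop := ∀ (x_phase : List (List Int)) (y_phase : List Int), Dom_accumulate_intervals x_phase y_phase → Pre_accumulate_intervals x_phase y_phase → Spec_accumulate_intervals x_phase y_phase (accumulate_intervals x_phase y_phase)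

-- ===== LEMMAS AND PROOFS =====

-- interval start / end as both ports read them
def ivS (iv : List Int) : Int := PySem.List.pyGetD iv 0 0
def ivE (iv : List Int) : Int := PySem.List.pyGetD iv 1 0
-- A's contribution of one (interval, weight) pair at point p
def cZ (p : Int) (q : List Int × Int) : Int := if ivS q.1 ≤ p ∧ p < ivE q.1 then q.2 else 0
-- B's difference-map contribution of one pair at point p
def cB (p : Int) (q : List Int × Int) : Int :=
  if ivS q.1 < ivE q.1 then (if p = ivS q.1 then q.2 else 0) + (if p = ivE q.1 then -q.2 else 0) else 0
-- A's value at p, as a sum over the zipped pairs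
def tZ (x_phase : List (List Int)) (y_phase : List Int) (p : Int) : Int :=
  ((x_phase.zip y_phase).map (cZ p)).sum

theorem diffD_aux (l : List (List Int × Int)) : ∀ (d : PySem.Dict Int Int) (p : Int),
    (l.foldl (fun (d : PySem.Dict Int Int) q =>
      if PySem.List.pyGetD q.1 0 0 < PySem.List.pyGetD q.1 1 0 then
        (d.modify (PySem.List.pyGetD q.1 0 0) 0 (fun v => v + q.2)).modify
          (PySem.List.pyGetD q.1 1 0) 0 (fun v => v - q.2)
      else d) d).getD p 0
    = d.getD p 0 + (l.map (cB p)).sum := by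
  induction l with
  | nil => intro d p; simp
  | cons q t ih =>
    intro d p
    simp only [List.foldl_cons, List.map_cons, List.sum_cons]
    rw [ih]
    have hkey : ((if PySem.List.pyGetD q.1 0 0 < PySem.List.pyGetD q.1 1 0 then
        (d.modify (PySem.List.pyGetD q.1 0 0) 0 (fun v => v + q.2)).modify
          (PySem.List.pyGetD q.1 1 0) 0 (fun v => v - q.2)
      else d)).getD p 0 = d.getD p 0 + cB p q := by
      by_cases h : PySem.List.pyGetD q.1 0 0 < PySem.List.pyGetD q.1 1 0
      · rw [if_pos h]
        simp only [PySem.Dict.getD_modify]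
        simp only [cB, ivS, ivE, if_pos h]
        have hne : ¬ (PySem.List.pyGetD q.1 1 0 = PySem.List.pyGetD q.1 0 0) := by omega
        by_cases hpe : p = PySem.List.pyGetD q.1 1 0
        · subst hpe; simp [hne]; omega
        · by_cases hps : p = PySem.List.pyGetD q.1 0 0
          · subst hps; simp [hpe]
          · simp [hpe, hps]
      · rw [if_neg h]
        simp [cB, ivS, ivE, if_neg h]
    omega

theorem diffD_getD (x_phase : List (List Int)) (y_phase : List Int) (p : Int) :
    (diffD x_phase y_phase).getD p 0 = ((x_phase.zip y_phase).map (cB p)).sum := by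
  unfold diffD
  rw [diffD_aux]
  simp

theorem points_eq (x_phase : List (List Int)) :
    PySem.List.sorted (PySem.Set.ofList (PySem.List.sorted x_phase.flatten (fun v => v) false)) (fun v => v) false
      = PySem.List.sorted (PySem.Set.ofList x_phase.flatten) (fun v => v) false := by
  apply PySem.List.sorted_eq_sorted_of_perm _ _ (fun v => v) (fun a b h => h)
  rw [List.perm_ext_iff_of_nodup (PySem.Set.nodup_ofList _) (PySem.Set.nodup_ofList _)]
  intro v
  simp [PySem.Set.mem_ofList, PySem.List.mem_sorted]

-- the zip-indexed form of A's inner loop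
theorem bridge (y_phase : List Int) (p : Int) :
    ∀ (x : List (List Int)) (s : Nat),
    ((PySem.List.enumerate x (s : Int)).map (fun q =>
        if PySem.List.pyGetD q.2 0 0 ≤ p ∧ p < PySem.List.pyGetD q.2 1 0 then
          PySem.List.pyGetD y_phase q.1 0 else 0)).sum
      = ((x.zip (y_phase.drop s)).map (cZ p)).sum := by
  intro x
  induction x with
  | nil => intro s; simp [PySem.List.enumerate_nil]
  | cons iv t ih =>
    intro s
    rw [PySem.List.enumerate_cons]
    simp only [List.map_cons, List.sum_cons]
    have hcast : (s : Int) + 1 = ((s + 1 : Nat) : Int) := by push_cast; ring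
    rw [hcast, ih (s + 1)]
    rcases hdrop : y_phase.drop s with _ | ⟨w, ys⟩
    · have hlen : y_phase.length ≤ s := List.drop_eq_nil_iff.mp hdrop
      have h2 : y_phase.drop (s + 1) = [] := List.drop_eq_nil_iff.mpr (by omega)
      have hg : PySem.List.pyGetD y_phase ((s : Nat) : Int) 0 = 0 := by
        rw [PySem.List.pyGetD_natCast]; exact List.getD_eq_default _ _ hlen
      rw [h2, hg]
      simp
    · have hw : PySem.List.pyGetD y_phase ((s : Nat) : Int) 0 = w := by
        rw [PySem.List.pyGetD_natCast]
        have hget : y_phase[s]? = some w := by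
          have h0 := (List.getElem?_drop (xs := y_phase) (i := s) (j := 0)).symm
          rw [hdrop] at h0; simpa using h0
        simp [List.getD_eq_getElem?_getD, hget]
      have hys : y_phase.drop (s + 1) = ys := by
        have hdd : y_phase.drop (s + 1) = (y_phase.drop s).drop 1 := by
          rw [List.drop_drop]
        rw [hdd, hdrop]; rfl
      rw [hys, hw]
      simp only [List.zip_cons_cons, List.map_cons, List.sum_cons]
      rfl

-- A's inner loop computes tZ
theorem A_inner (x_phase : List (List Int)) (y_phase : List Int) (point : Int) :
    (PySem.List.enumerate x_phase 0).foldl (fun v q =>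
        if PySem.List.pyGetD q.2 0 0 ≤ point ∧ point < PySem.List.pyGetD q.2 1 0 then
          v + PySem.List.pyGetD y_phase q.1 0
        else v) 0 = tZ x_phase y_phase point := by
  have hfun : (fun (v : Int) (q : Int × List Int) =>
      if PySem.List.pyGetD q.2 0 0 ≤ point ∧ point < PySem.List.pyGetD q.2 1 0 then
        v + PySem.List.pyGetD y_phase q.1 0 else v)
      = fun v q => v + (if PySem.List.pyGetD q.2 0 0 ≤ point ∧ point < PySem.List.pyGetD q.2 1 0 then
        PySem.List.pyGetD y_phase q.1 0 else 0) := by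
    funext v q; split <;> simp
  rw [hfun, PySem.List.foldl_add]
  have hb := bridge y_phase point x_phase 0
  simp only [Nat.cast_zero, List.drop_zero] at hb
  rw [hb, tZ]
  omega

-- one interval's A-contribution step equals its B-event at b, for a < b with
-- no relevant value strictly between a and b
theorem contrib_step (a b s e w : Int) (hab : a < b) (hs : s ≤ a ∨ b ≤ s) (he : e ≤ a ∨ b ≤ e) :
    (if s ≤ b ∧ b < e then w else 0) - (if s ≤ a ∧ a < e then w else 0)
      = (if s < e then (if b = s then w else 0) + (if b = e then -w else 0) else 0) := by
  split_ifs <;> omega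

theorem tZ_step (a b : Int) (hab : a < b) :
    ∀ (x : List (List Int)) (y : List Int),
      (∀ iv ∈ x, 2 ≤ iv.length) →
      (∀ v ∈ x.flatten, v ≤ a ∨ b ≤ v) →
      tZ x y b - tZ x y a = ((x.zip y).map (cB b)).sum := by
  intro x
  induction x with
  | nil => intro y _ _; simp [tZ]
  | cons iv t ih =>
    intro y hlen hside
    cases y with
    | nil => simp [tZ]
    | cons w ys =>
      have hlen' : ∀ j ∈ t, 2 ≤ j.length := fun j hj => hlen j (List.mem_cons_of_mem _ hj)
      have hside' : ∀ v ∈ t.flatten, v ≤ a ∨ b ≤ v := by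
        intro v hv
        exact hside v (by rw [List.flatten_cons]; exact List.mem_append_right _ hv)
      have hl2 : 2 ≤ iv.length := hlen iv List.mem_cons_self
      have hin0 : PySem.Raise.InRange iv.length 0 := by
        simp [PySem.Raise.InRange]; omega
      have hin1 : PySem.Raise.InRange iv.length 1 := by
        simp [PySem.Raise.InRange]; omega
      have hS : ivS iv ∈ iv := PySem.List.pyGetD_mem iv 0 hin0
      have hE : ivE iv ∈ iv := PySem.List.pyGetD_mem iv 0 hin1
      have hSf : ivS iv ≤ a ∨ b ≤ ivS iv :=
        hside _ (by rw [List.flatten_cons]; exact List.mem_append_left _ hS)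
      have hEf : ivE iv ≤ a ∨ b ≤ ivE iv :=
        hside _ (by rw [List.flatten_cons]; exact List.mem_append_left _ hE)
      have hkey := contrib_step a b (ivS iv) (ivE iv) w hab hSf hEf
      have hhead : cZ b (iv, w) - cZ a (iv, w) = cB b (iv, w) := by
        simp only [cZ, cB]
        exact hkey
      have iheq := ih ys hlen' hside'
      simp only [tZ, List.zip_cons_cons, List.map_cons, List.sum_cons] at iheq ⊢
      omega

theorem tZ_min (b : Int) (x : List (List Int)) (y : List Int)
    (hlen : ∀ iv ∈ x, 2 ≤ iv.length) (hmin : ∀ v ∈ x.flatten, b ≤ v) :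
    tZ x y b = ((x.zip y).map (cB b)).sum := by
  have h0 : tZ x y (b - 1) = 0 := by
    rw [tZ]
    apply List.sum_eq_zero
    intro z hz
    simp only [List.mem_map] at hz
    obtain ⟨q, hq, rfl⟩ := hz
    have hq1 : q.1 ∈ x := (List.of_mem_zip (l₁ := x) (l₂ := y) (by simpa using hq)).1
    have hl2 : 2 ≤ q.1.length := hlen _ hq1
    have hin0 : PySem.Raise.InRange q.1.length 0 := by
      simp [PySem.Raise.InRange]; omega
    have hSm : ivS q.1 ∈ q.1 := PySem.List.pyGetD_mem q.1 0 hin0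
    have hbs : b ≤ ivS q.1 := hmin _ (List.mem_flatten.mpr ⟨q.1, hq1, hSm⟩)
    simp only [cZ]
    rw [if_neg]
    rintro ⟨h1, _⟩
    omega
  have hstep := tZ_step (b - 1) b (by omega) x y hlen (fun v hv => Or.inr (hmin v hv))
  omega

-- chain of adjacent-point identities along the sorted point list
def chainOK (g t : Int → Int) : List Int → Prop
  | [] => True
  | [_] => True
  | a :: b :: tl => t b = t a + g b ∧ chainOK g t (b :: tl)

theorem chainOK_of_index (g t : Int → Int) :
    ∀ ps : List Int, (∀ i (_ : i + 1 < ps.length), t ps[i + 1] = t ps[i] + g ps[i + 1]) →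
      chainOK g t ps := by
  intro ps
  induction ps with
  | nil => intro _; trivial
  | cons a tl ih =>
    intro h
    cases tl with
    | nil => trivial
    | cons b tl' =>
      refine ⟨by simpa using h 0 (by simp), ih ?_⟩
      intro i hi
      have := h (i + 1) (by simp at hi ⊢; omega)
      simpa using this

theorem scan_eq (g t : Int → Int) :
    ∀ (ps : List Int) (acc : List Int) (r : Int),
      (∀ p ∈ ps.head?, t p = r + g p) → chainOK g t ps →
      ps.foldl (fun (ac : List Int × Int) p => (ac.1 ++ [ac.2 + g p], ac.2 + g p)) (acc, r)
        = (acc ++ ps.map t, (ps.map t).getLastD r) := by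
  intro ps
  induction ps with
  | nil => intro acc r _ _; simp
  | cons p tl ih =>
    intro acc r h0 hch
    have hp : t p = r + g p := h0 p (by simp)
    simp only [List.foldl_cons]
    rw [show r + g p = t p from hp.symm]
    have h0' : ∀ q ∈ tl.head?, t q = t p + g q := by
      intro q hq
      cases tl with
      | nil => simp at hq
      | cons b tl' =>
        simp at hq; subst hq
        exact hch.1
    have hch' : chainOK g t tl := by
      cases tl with
      | nil => trivial
      | cons b tl' => exact hch.2
    rw [ih (acc ++ [t p]) (t p) h0' hch']
    simp only [List.map_cons, List.getLastD_cons, List.append_assoc, List.singleton_append]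

-- ===== VERDICT (by name: the statement is the Claim_ definition above) =====
theorem accumulate_intervals_spec : Claim_equal_accumulate_intervals := by
  intro x y hdom hpre
  obtain ⟨hlen, -⟩ := hpre
  unfold Spec_accumulate_intervals
  simp only [accumulate_intervals, accumulate_intervals_alt]
  rw [points_eq]
  set pts := PySem.List.sorted (PySem.Set.ofList x.flatten) (fun v => v) false with hpts
  have hmemp : ∀ v, v ∈ x.flatten → v ∈ pts := by
    intro v hv
    rw [hpts, PySem.List.mem_sorted, PySem.Set.mem_ofList]
    exact hv
  have hpairwise : pts.Pairwise (· < ·) := by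
    rw [hpts]; exact PySem.List.sorted_ofList_pairwise_lt _
  have hch : chainOK (fun p => (diffD x y).getD p 0) (tZ x y) pts := by
    apply chainOK_of_index
    intro i hi
    have hab : pts[i] < pts[i + 1] :=
      List.pairwise_iff_getElem.mp hpairwise i (i + 1) (by omega) hi (by omega)
    have hside : ∀ v ∈ x.flatten, v ≤ pts[i] ∨ pts[i + 1] ≤ v := by
      intro v hv
      obtain ⟨j, hj, hje⟩ := List.mem_iff_getElem.mp (hmemp v hv)
      by_cases hji : j ≤ i
      · left; rw [← hje]
        rcases Nat.eq_or_lt_of_le hji with heq | hlt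
        · subst heq; exact le_refl _
        · exact le_of_lt (List.pairwise_iff_getElem.mp hpairwise j i hj (by omega) hlt)
      · right; rw [← hje]
        have hij : i + 1 ≤ j := by omega
        rcases Nat.eq_or_lt_of_le hij with heq | hlt
        · subst heq; exact le_refl _
        · exact le_of_lt (List.pairwise_iff_getElem.mp hpairwise (i + 1) j hi hj hlt)
    have hst := tZ_step pts[i] pts[i + 1] hab x y hlen hside
    rw [diffD_getD]
    omega
  have hh : ∀ p ∈ pts.head?, tZ x y p = 0 + (diffD x y).getD p 0 := by
    intro p hp
    have hmin : ∀ v ∈ x.flatten, p ≤ v := by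
      intro v hv
      cases hpts' : pts with
      | nil => rw [hpts'] at hp; simp at hp
      | cons m tl =>
        rw [hpts'] at hp; simp at hp; subst hp
        have hkh := PySem.List.key_head_sorted_le (PySem.Set.ofList x.flatten) (fun v => v)
          (by rw [← hpts]; exact hpts')
        exact hkh v ((PySem.Set.mem_ofList _ _).mpr hv)
    rw [diffD_getD]
    have := tZ_min p x y hlen hmin
    omega
  have hscan := scan_eq (fun p => (diffD x y).getD p 0) (tZ x y) pts [] 0 hh hch
  refine Prod.ext rfl ?_
  show pts.foldl (fun acc point =>
      acc ++ [(PySem.List.enumerate x 0).foldl (fun v q =>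
        if PySem.List.pyGetD q.2 0 0 ≤ point ∧ point < PySem.List.pyGetD q.2 1 0 then
          v + PySem.List.pyGetD y q.1 0
        else v) 0]) []
    = (pts.foldl (fun (ac : List Int × Int) p =>
        (ac.1 ++ [ac.2 + (diffD x y).getD p 0], ac.2 + (diffD x y).getD p 0)) ([], 0)).1
  rw [PySem.List.foldl_append_singleton_eq_map]
  have hmapA : pts.map (fun point => (PySem.List.enumerate x 0).foldl (fun v q =>
      if PySem.List.pyGetD q.2 0 0 ≤ point ∧ point < PySem.List.pyGetD q.2 1 0 then
        v + PySem.List.pyGetD y q.1 0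
      else v) 0) = pts.map (tZ x y) := by
    exact List.map_congr_left (fun p _ => A_inner x y p)
  rw [List.nil_append, hmapA]
  have hB : (pts.foldl (fun (ac : List Int × Int) p =>
      (ac.1 ++ [ac.2 + (diffD x y).getD p 0], ac.2 + (diffD x y).getD p 0)) ([], 0)).1
      = pts.map (tZ x y) := by
    rw [hscan]
    simp
  rw [hB]
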